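-- pv_equiv track=rewrite | github.com/77svene/axiom | axiom/extraction/schema.py | _infer_transformations
-- ===== SOURCE A (Python) =====
-- from typing import Any, Dict, List, Optional, Set, Tuple, Union
--
-- def _infer_transformations(field_values: Dict[str, List[Any]]) -> Dict[str, str]:
--     """Infer data transformations needed for each field."""
--     transformations = {}
--
--     for field_name, values in field_values.items():
--         str_values = [str(v) for v in values if v is not None]
--
--         # Check for whitespace issues
--         has_whitespace_issues = any(
--             v != v.strip() or '  ' in v for v in str_values
--         )
--
--         if has_whitespace_issues:
--             transformations[field_name] = 'normalize_whitespace'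
--
--         # Check for HTML entities
--         has_html_entities = any(
--             '&' in v and ';' in v for v in str_values
--         )
--
--         if has_html_entities:
--             if field_name in transformations:
--                 transformations[field_name] += ',unescape_html'
--             else:
--                 transformations[field_name] = 'unescape_html'
--
--     return transformations
-- ===== SOURCE B (Python) =====
-- from typing import Any, Dict, List
--
-- # Table of transformation rules, applied rule-major (outer loop over rules,
-- # inner loop over fields), accumulating the labels each field earns; the final
-- # comprehension joins them in rule order and drops untouched fields.
-- _RULES = [
--     ("normalize_whitespace", lambda s: s != s.strip() or "  " in s),
--     ("unescape_html", lambda s: "&" in s and ";" in s),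
-- ]
--
--
-- def _infer_transformations(field_values: Dict[str, List[Any]]) -> Dict[str, str]:
--     """Infer data transformations needed for each field (rule-major passes)."""
--     hits = {field_name: [] for field_name in field_values}
--     for label, applies in _RULES:
--         for field_name, values in field_values.items():
--             if any(applies(str(v)) for v in values if v is not None):
--                 hits[field_name].append(label)
--     return {f: ",".join(labels) for f, labels in hits.items() if labels}
-- ===== Notes on version B (the rewrite author's own statement) =====
-- stated objective: alternative
-- what changed: Replaces A's field-major loop with its two separate any() scans and membership-test/'+=' dict patching by a data-driven rule table applied rule-major (outer loop over rules, inner over fields), accumulating per-field label lists that a final join-comprehension turns into the result.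
import Mathlib
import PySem

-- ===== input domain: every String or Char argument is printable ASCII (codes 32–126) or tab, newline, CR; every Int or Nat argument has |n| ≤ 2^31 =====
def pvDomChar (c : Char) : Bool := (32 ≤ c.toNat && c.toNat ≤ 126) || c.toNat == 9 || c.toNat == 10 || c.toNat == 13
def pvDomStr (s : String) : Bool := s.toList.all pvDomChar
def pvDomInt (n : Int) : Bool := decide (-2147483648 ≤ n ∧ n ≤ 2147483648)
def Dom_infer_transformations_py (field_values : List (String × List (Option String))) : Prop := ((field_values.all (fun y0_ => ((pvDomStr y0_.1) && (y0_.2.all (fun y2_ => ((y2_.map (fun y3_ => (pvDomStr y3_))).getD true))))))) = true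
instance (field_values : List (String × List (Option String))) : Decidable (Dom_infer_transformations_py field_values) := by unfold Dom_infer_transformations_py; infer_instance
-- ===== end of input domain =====

-- B replaces A's field-major loop (two separate any() scans plus membership-test/'+='
-- dict patching) by a data-driven rule table applied rule-major — outer loop over the
-- rules, inner loop over the fields — accumulating per-field label lists that a final
-- join-comprehension turns into the result; same cost class, different decomposition.

-- ===== PORT A =====
def infer_transformations_py (field_values : List (String × List (Option String))) : List (String × String) :=
  (field_values.foldl (fun (t : PySem.Dict String String) p =>
    let str_values := p.2.filterMap (fun v => v)
    let has_whitespace_issues :=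
      str_values.any (fun v => decide (v ≠ PySem.Str.strip v) || PySem.Str.isIn "  " v)
    let t := if has_whitespace_issues then t.insert p.1 "normalize_whitespace" else t
    let has_html_entities :=
      str_values.any (fun v => PySem.Str.isIn "&" v && PySem.Str.isIn ";" v)
    if has_html_entities then
      if t.contains p.1 then t.modify p.1 "" (fun w => w ++ ",unescape_html")
      else t.insert p.1 "unescape_html"
    else t) PySem.Dict.empty).items

-- ===== PORT B =====
-- the rule table _RULES of Source B: (label, predicate on the stringified value)
def pvRules : List (String × (String → Bool)) :=
  [("normalize_whitespace", fun s => decide (s ≠ PySem.Str.strip s) || PySem.Str.isIn "  " s),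
   ("unescape_html", fun s => PySem.Str.isIn "&" s && PySem.Str.isIn ";" s)]

def infer_transformations_py_alt (field_values : List (String × List (Option String))) : List (String × String) :=
  -- hits = {field_name: [] for field_name in field_values}
  let hits : PySem.Dict String (List String) :=
    field_values.foldl (fun d p => d.insert p.1 ([] : List String)) PySem.Dict.empty
  -- for label, applies in _RULES: for field_name, values in field_values.items(): …
  let hits := pvRules.foldl (fun h r =>
      field_values.foldl (fun h p =>
        if (p.2.filterMap (fun v => v)).any r.2 then
          h.modify p.1 [] (fun ls => ls ++ [r.1])
        else h) h) hits
  -- {f: ",".join(labels) for f, labels in hits.items() if labels}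
  (hits.items.foldl (fun (t : PySem.Dict String String) q =>
     if q.2.isEmpty then t else t.insert q.1 (PySem.Str.join "," q.2)) PySem.Dict.empty).items

-- ===== PRECONDITION & SPEC =====
-- Pre_ excludes association lists with duplicate field names: A's input is a Python dict,
-- whose keys are necessarily distinct, so no excluded input corresponds to a call of A.
def Pre_infer_transformations_py (field_values : List (String × List (Option String))) : Prop :=
  (field_values.map Prod.fst).Nodup
instance (field_values : List (String × List (Option String))) : Decidable (Pre_infer_transformations_py field_values) := by
  unfold Pre_infer_transformations_py; infer_instance

def pvWitness_infer_transformations_py : (List (String × List (Option String))) :=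
  [("name", [some " a ", none, some "x"]), ("bio", [some "a&amp;b"])]

def Spec_infer_transformations_py (field_values : List (String × List (Option String))) (out : List (String × String)) : Prop := out = infer_transformations_py_alt field_values
instance (field_values : List (String × List (Option String))) (out : List (String × String)) : Decidable (Spec_infer_transformations_py field_values out) := by unfold Spec_infer_transformations_py; infer_instance

-- ===== CLAIM (what is proved, stated in full; the proofs are below) =====
def Claim_equal_infer_transformations_py : Prop := ∀ (field_values : List (String × List (Option String))), Dom_infer_transformations_py field_values → Pre_infer_transformations_py field_values → Spec_infer_transformations_py field_values (infer_transformations_py field_values)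

-- ===== LEMMAS AND PROOFS =====

-- the label list a field earns, used only by the proofs
def pvLabels (vals : List (Option String)) : List String :=
  (if (vals.filterMap (fun v => v)).any
      (fun s => decide (s ≠ PySem.Str.strip s) || PySem.Str.isIn "  " s)
    then ["normalize_whitespace"] else []) ++
  (if (vals.filterMap (fun v => v)).any
      (fun s => PySem.Str.isIn "&" s && PySem.Str.isIn ";" s)
    then ["unescape_html"] else [])
-- the common result both programs compute on distinct field names
def pvSpec (fv : List (String × List (Option String))) : List (String × String) :=
  fv.filterMap (fun p => if (pvLabels p.2).isEmpty then none
                         else some (p.1, PySem.Str.join "," (pvLabels p.2)))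

-- A's loop body, named
def pvStepA (t : PySem.Dict String String) (p : String × List (Option String)) : PySem.Dict String String :=
  let str_values := p.2.filterMap (fun v => v)
  let has_whitespace_issues := str_values.any (fun v => decide (v ≠ PySem.Str.strip v) || PySem.Str.isIn "  " v)
  let t := if has_whitespace_issues then t.insert p.1 "normalize_whitespace" else t
  let has_html_entities := str_values.any (fun v => PySem.Str.isIn "&" v && PySem.Str.isIn ";" v)
  if has_html_entities then
    if t.contains p.1 then t.modify p.1 "" (fun w => w ++ ",unescape_html")
    else t.insert p.1 "unescape_html"
  else t

-- on a fresh key, A's body either leaves the dict alone or appends the joined labels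
lemma stepA_fresh (d : PySem.Dict String String) (p : String × List (Option String))
    (hk : d.contains p.1 = false) :
    pvStepA d p = if (pvLabels p.2).isEmpty then d
                  else d.insert p.1 (PySem.Str.join "," (pvLabels p.2)) := by
  unfold pvStepA pvLabels
  cases hws : (p.2.filterMap (fun v => v)).any
      (fun s => decide (s ≠ PySem.Str.strip s) || PySem.Str.isIn "  " s) <;>
    cases hht : (p.2.filterMap (fun v => v)).any
      (fun s => PySem.Str.isIn "&" s && PySem.Str.isIn ";" s)
  · simp only [hws, hht]
    simp
  · simp only [hws, hht]
    simp [hk, show PySem.Str.join "," ["unescape_html"] = "unescape_html" from by decide]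
  · simp only [hws, hht]
    simp [show PySem.Str.join "," ["normalize_whitespace"] = "normalize_whitespace" from by decide]
  · simp only [hws, hht]
    simp [PySem.Dict.contains_insert_self, PySem.Dict.modify,
      PySem.Dict.getD_insert_self, PySem.Dict.insert_insert_self,
      show ("normalize_whitespace" ++ ",unescape_html" : String)
        = "normalize_whitespace,unescape_html" from by decide,
      show PySem.Str.join "," ["normalize_whitespace", "unescape_html"]
        = "normalize_whitespace,unescape_html" from by decide]

-- A's fold over fresh distinct keys appends exactly pvSpec
lemma foldA (fv : List (String × List (Option String))) (d : PySem.Dict String String)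
    (hnd : (fv.map Prod.fst).Nodup) (hfresh : ∀ k ∈ fv.map Prod.fst, d.contains k = false) :
    (fv.foldl pvStepA d).items = d.items ++ pvSpec fv := by
  induction fv generalizing d with
  | nil => simp [pvSpec]
  | cons p rest ih =>
    simp only [List.map_cons, List.nodup_cons, List.mem_cons] at hnd hfresh
    have hfp := hfresh p.1 (Or.inl rfl)
    rw [List.foldl_cons, stepA_fresh d p hfp]
    by_cases he : (pvLabels p.2).isEmpty
    · rw [if_pos he, ih d hnd.2 (fun k hk => hfresh k (Or.inr hk))]
      simp [pvSpec, List.isEmpty_iff.1 he]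
    · rw [if_neg he,
        ih _ hnd.2 (fun k hk =>
          by
            have hne : k ≠ p.1 := fun h => hnd.1 (h ▸ hk)
            simp [PySem.Dict.contains_insert, hfresh k (Or.inr hk),
              show (k == p.1) = false from by simpa using hne]),
        PySem.Dict.items_insert_of_not_contains d _ hfp]
      have he' : pvLabels p.2 ≠ [] := by simpa [List.isEmpty_iff] using he
      simp [pvSpec, he']

-- ===== B-side lemmas =====

-- value at key k after one rule pass: the original list, plus the label once per
-- field entry whose key is k and whose values trigger the predicate
lemma getD_rulePass (lab : String) (c : (String × List (Option String)) → Bool)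
    (fv : List (String × List (Option String))) (h : PySem.Dict String (List String)) (k : String) :
    (fv.foldl (fun h p => if c p then h.modify p.1 [] (fun ls => ls ++ [lab]) else h) h).getD k []
      = h.getD k [] ++ (fv.filter (fun p => p.1 == k && c p)).map (fun _ => lab) := by
  induction fv generalizing h with
  | nil => simp
  | cons q rest ih =>
    rw [List.foldl_cons]
    by_cases hc : c q
    · rw [if_pos hc, ih, PySem.Dict.getD_modify]
      by_cases hk : k = q.1
      · simp [hk, hc]
      · simp [hk, hc, show (q.1 == k) = false from by simpa using (Ne.symm hk)]
    · rw [if_neg hc, ih]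
      simp [hc]

-- a rule pass never changes the key list when every touched key is present
lemma keys_rulePass (lab : String) (c : (String × List (Option String)) → Bool)
    (fv : List (String × List (Option String))) (h : PySem.Dict String (List String))
    (hin : ∀ p ∈ fv, h.contains p.1 = true) :
    (fv.foldl (fun h p => if c p then h.modify p.1 [] (fun ls => ls ++ [lab]) else h) h).keys
      = h.keys := by
  induction fv generalizing h with
  | nil => rfl
  | cons q rest ih =>
    rw [List.foldl_cons]
    by_cases hc : c q
    · rw [if_pos hc]
      have hk : (h.modify q.1 [] (fun ls => ls ++ [lab])).keys = h.keys := by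
        rw [PySem.Dict.keys_modify, PySem.Dict.keys_insert_of_contains h _ (hin q (by simp))]
      rw [ih _ (fun p hp => by
        rw [show (h.modify q.1 [] (fun ls => ls ++ [lab])).contains p.1 = true ↔
              p.1 ∈ (h.modify q.1 [] (fun ls => ls ++ [lab])).keys from
            PySem.Dict.contains_iff_mem_keys _ _, hk,
          ← PySem.Dict.contains_iff_mem_keys]
        exact hin p (by simp [hp])), hk]
    · rw [if_neg hc]
      exact ih _ (fun p hp => hin p (by simp [hp]))

-- with distinct keys, the key-filtered sublist at p.1 is p alone (or empty)
lemma filter_key_nodup (fv : List (String × List (Option String)))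
    (c : (String × List (Option String)) → Bool)
    (p : String × List (Option String)) (hp : p ∈ fv) (hnd : (fv.map Prod.fst).Nodup) :
    fv.filter (fun q => q.1 == p.1 && c q) = if c p then [p] else [] := by
  induction fv with
  | nil => cases hp
  | cons q rest ih =>
    simp only [List.map_cons, List.nodup_cons] at hnd
    rcases List.mem_cons.1 hp with hqp | hmem
    · subst hqp
      have hrest : rest.filter (fun r => r.1 == p.1 && c r) = [] := by
        apply List.filter_eq_nil_iff.2
        intro r hr
        have hne : r.1 ≠ p.1 := by
          intro h
          exact hnd.1 (h ▸ List.mem_map_of_mem (f := Prod.fst) hr)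
        simp [hne]
      by_cases hc : c p <;> simp [hc, hrest]
    · have hne : (q.1 == p.1) = false := by
        have h' : q.1 ≠ p.1 := by
          intro h
          exact hnd.1 (h ▸ List.mem_map_of_mem (f := Prod.fst) hmem)
        simpa using h'
      simp [hne, ih hmem hnd.2]

-- the conditional-insert output fold over fresh distinct keys appends a filterMap
lemma foldOut (l : List (String × List String)) (t : PySem.Dict String String)
    (hnd : (l.map Prod.fst).Nodup) (hfresh : ∀ k ∈ l.map Prod.fst, t.contains k = false) :
    (l.foldl (fun t q => if q.2.isEmpty then t else t.insert q.1 (PySem.Str.join "," q.2)) t).items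
      = t.items ++ l.filterMap (fun q => if q.2.isEmpty then none
                                         else some (q.1, PySem.Str.join "," q.2)) := by
  induction l generalizing t with
  | nil => simp
  | cons q rest ih =>
    simp only [List.map_cons, List.nodup_cons, List.mem_cons] at hnd hfresh
    rw [List.foldl_cons]
    by_cases he : q.2.isEmpty
    · rw [if_pos he, ih t hnd.2 (fun k hk => hfresh k (Or.inr hk))]
      simp [List.isEmpty_iff.1 he]
    · rw [if_neg he,
        ih _ hnd.2 (fun k hk => by
          have hne : k ≠ q.1 := fun h => hnd.1 (h ▸ hk)
          simp [PySem.Dict.contains_insert, hfresh k (Or.inr hk),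
            show (k == q.1) = false from by simpa using hne]),
        PySem.Dict.items_insert_of_not_contains t _ (hfresh q.1 (Or.inl rfl))]
      have he' : q.2 ≠ [] := by simpa [List.isEmpty_iff] using he
      simp [he']

-- B computes pvSpec on distinct keys
lemma portB_eq_spec (fv : List (String × List (Option String)))
    (hnd : (fv.map Prod.fst).Nodup) :
    infer_transformations_py_alt fv = pvSpec fv := by
  unfold infer_transformations_py_alt
  dsimp only
  -- the initial dict: one empty list per field, in order
  have hinit : (fv.foldl (fun d p => d.insert p.1 ([] : List String)) PySem.Dict.empty).items
      = fv.map (fun p => (p.1, ([] : List String))) := by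
    rw [PySem.Dict.items_foldl_insert_fresh fv Prod.fst (fun _ => ([] : List String))
      PySem.Dict.empty (fun a _ => PySem.Dict.contains_empty a.1) hnd]
    rfl
  set d0 := fv.foldl (fun d p => d.insert p.1 ([] : List String)) PySem.Dict.empty with hd0
  have hkeys0 : d0.keys = fv.map Prod.fst := by
    show d0.items.map Prod.fst = _
    rw [hinit, List.map_map]; rfl
  have hcont0 : ∀ p ∈ fv, d0.contains p.1 = true := fun p hp =>
    (PySem.Dict.contains_iff_mem_keys _ _).2 (hkeys0 ▸ List.mem_map_of_mem hp)
  -- unfold the two-element rule fold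
  rw [show pvRules.foldl (fun h r => fv.foldl (fun h p =>
        if (p.2.filterMap (fun v => v)).any r.2 then h.modify p.1 [] (fun ls => ls ++ [r.1]) else h) h) d0
      = fv.foldl (fun h p => if (p.2.filterMap (fun v => v)).any (fun s => PySem.Str.isIn "&" s && PySem.Str.isIn ";" s) then
            h.modify p.1 [] (fun ls => ls ++ ["unescape_html"]) else h)
          (fv.foldl (fun h p => if (p.2.filterMap (fun v => v)).any (fun s => decide (s ≠ PySem.Str.strip s) || PySem.Str.isIn "  " s) then
            h.modify p.1 [] (fun ls => ls ++ ["normalize_whitespace"]) else h) d0) from rfl]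
  set d1 := fv.foldl (fun h p => if (p.2.filterMap (fun v => v)).any (fun s => decide (s ≠ PySem.Str.strip s) || PySem.Str.isIn "  " s) then
      h.modify p.1 [] (fun ls => ls ++ ["normalize_whitespace"]) else h) d0 with hd1
  set d2 := fv.foldl (fun h p => if (p.2.filterMap (fun v => v)).any (fun s => PySem.Str.isIn "&" s && PySem.Str.isIn ";" s) then
      h.modify p.1 [] (fun ls => ls ++ ["unescape_html"]) else h) d1 with hd2
  have hkeys1 : d1.keys = fv.map Prod.fst := by
    rw [hd1, keys_rulePass _ _ _ _ hcont0, hkeys0]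
  have hcont1 : ∀ p ∈ fv, d1.contains p.1 = true := fun p hp =>
    (PySem.Dict.contains_iff_mem_keys _ _).2 (hkeys1 ▸ List.mem_map_of_mem hp)
  have hkeys2 : d2.keys = fv.map Prod.fst := by
    rw [hd2, keys_rulePass _ _ _ _ hcont1, hkeys1]
  have hget0 : ∀ p ∈ fv, d0.getD p.1 [] = [] := fun p hp =>
    PySem.Dict.getD_of_mem_items d0 (by rw [hinit]; exact List.mem_map_of_mem hp)
      (by rw [hkeys0]; exact hnd) []
  have hget2 : ∀ p ∈ fv, d2.getD p.1 [] = pvLabels p.2 := by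
    intro p hp
    rw [hd2, getD_rulePass, hd1, getD_rulePass, hget0 p hp,
      filter_key_nodup fv _ p hp hnd, filter_key_nodup fv _ p hp hnd]
    unfold pvLabels
    by_cases h1 : (p.2.filterMap (fun v => v)).any
        (fun s => decide (s ≠ PySem.Str.strip s) || PySem.Str.isIn "  " s) <;>
      by_cases h2 : (p.2.filterMap (fun v => v)).any
        (fun s => PySem.Str.isIn "&" s && PySem.Str.isIn ";" s) <;>
      simp only [h1, h2] <;> simp
  have hitems2 : d2.items = fv.map (fun p => (p.1, pvLabels p.2)) := by
    rw [PySem.Dict.items_eq_map_keys d2 (hkeys2 ▸ hnd) [], hkeys2, List.map_map]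
    exact List.map_congr_left (fun p hp => by simp [hget2 p hp])
  rw [hitems2, foldOut _ PySem.Dict.empty
      (by rw [List.map_map]; exact hnd)
      (fun k _ => PySem.Dict.contains_empty k),
    List.filterMap_map]
  simp [pvSpec, Function.comp,
    show (PySem.Dict.empty : PySem.Dict String String).items = [] from rfl]

-- ===== VERDICT (by name: the statement is the Claim_ definition above) =====
theorem infer_transformations_py_spec : Claim_equal_infer_transformations_py := by
  intro fv _ hpre
  unfold Spec_infer_transformations_py
  rw [portB_eq_spec fv hpre]
  show (fv.foldl pvStepA PySem.Dict.empty).items = pvSpec fv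
  rw [foldA fv PySem.Dict.empty hpre (fun k _ => PySem.Dict.contains_empty k)]
  rfl
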